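-- pv_equiv track=rewrite | github.com/ppwang06/frida_js | web/yuanrenxue/match_1/match_1.py | binl2hex
-- ===== SOURCE A (Python) =====
-- hexcase = 0
--
-- def binl2hex(binarray):
--     hex_tab = "0123456789abcdef" if not hexcase else "0123456789ABCDEF"
--     hex_str = ""
--     for i in range(len(binarray) * 4):
--         word = binarray[i >> 2]
--         high = (word >> ((i % 4) * 8 + 4)) & 0x0F
--         low = (word >> ((i % 4) * 8)) & 0x0F
--         hex_str += hex_tab[high] + hex_tab[low]
--     return hex_str
-- ===== SOURCE B (Python) =====
-- hexcase = 0
--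
-- def binl2hex(binarray):
--     ba = bytearray()
--     for w in binarray:
--         ba += (w & 0xFFFFFFFF).to_bytes(4, 'little')
--     s = bytes(ba).hex()
--     return s.upper() if hexcase else s
-- ===== Notes on version B (the rewrite author's own statement) =====
-- stated objective: faster
-- what changed: B replaces the per-byte-index loop with shift/mask nibble extraction and hex-table lookup by serializing each word to 4 little-endian bytes ((w & 0xFFFFFFFF).to_bytes(4,'little')) into a bytearray and formatting the whole buffer at once with bytes.hex().
import Mathlib
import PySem

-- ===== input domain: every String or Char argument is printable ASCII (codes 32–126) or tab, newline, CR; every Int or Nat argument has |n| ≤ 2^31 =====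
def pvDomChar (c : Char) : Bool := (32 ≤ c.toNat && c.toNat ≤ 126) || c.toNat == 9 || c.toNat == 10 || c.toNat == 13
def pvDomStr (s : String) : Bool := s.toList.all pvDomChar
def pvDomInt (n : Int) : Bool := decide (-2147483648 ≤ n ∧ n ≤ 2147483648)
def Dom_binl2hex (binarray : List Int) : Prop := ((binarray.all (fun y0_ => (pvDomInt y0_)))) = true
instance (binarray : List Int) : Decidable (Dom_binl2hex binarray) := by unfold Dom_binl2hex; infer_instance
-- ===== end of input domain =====

-- B serializes each word to 4 little-endian bytes and formats them with built-in bytes.hex(); same O(n) but measurably faster (C-level formatting, no per-nibble Python work).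

-- module-level constant from the Python source (hexcase = 0)
def pvHexcase : Int := 0

-- ===== PORT A =====
-- Python `w >> k` (k ≥ 0) is floor division by 2^k; `& 0x0F` on its result is `% 16` — exact.
-- The string accumulator is kept as a List Char and packed with String.mk at the end.
def binl2hex (binarray : List Int) : String :=
  let hex_tab : List Char :=
    if pvHexcase == 0 then ['0','1','2','3','4','5','6','7','8','9','a','b','c','d','e','f']
    else ['0','1','2','3','4','5','6','7','8','9','A','B','C','D','E','F']
  String.mk <|
    (PySem.List.pyRange 0 (binarray.length * 4) 1).foldl (fun hex_str i =>
      let word := PySem.List.pyGetD binarray (PySem.Int.floordiv i 4) 0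
      let high := PySem.Int.mod (PySem.Int.floordiv word (2 ^ (PySem.Int.mod i 4 * 8 + 4).toNat)) 16
      let low  := PySem.Int.mod (PySem.Int.floordiv word (2 ^ (PySem.Int.mod i 4 * 8).toNat)) 16
      hex_str ++ [PySem.List.pyGetD hex_tab high ' ', PySem.List.pyGetD hex_tab low ' ']) []

-- ===== PORT B =====
-- B-side helper: `(w & 0xFFFFFFFF).to_bytes(4, 'little')` — the mask is `% 2**32` (positive
-- power-of-two mask on a Python int) and the 4 little-endian bytes are written out — exact.
def pvBytes (w : Int) : List Nat :=
  let m := (PySem.Int.mod w 4294967296).toNat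
  [m % 256, m / 256 % 256, m / 65536 % 256, m / 16777216 % 256]

-- `bytes.hex()` = two lowercase hex digits per byte (Nat.digitChar is 0-9a-f on 0..15)
def binl2hex_alt (binarray : List Int) : String :=
  let ba : List Nat := binarray.foldl (fun ba w => ba ++ pvBytes w) []
  let s := String.mk (ba.flatMap (fun b => [Nat.digitChar (b / 16), Nat.digitChar (b % 16)]))
  if pvHexcase == 0 then s else PySem.Str.upper s

-- ===== PRECONDITION & SPEC =====
def Spec_binl2hex (binarray : List Int) (out : String) : Prop := out = binl2hex_alt binarray
instance (binarray : List Int) (out : String) : Decidable (Spec_binl2hex binarray out) := by unfold Spec_binl2hex; infer_instance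

-- ===== CLAIM (what is proved, stated in full; the proofs are below) =====
def Claim_equal_binl2hex : Prop := ∀ (binarray : List Int), Dom_binl2hex binarray → Spec_binl2hex binarray (binl2hex binarray)

-- ===== LEMMAS AND PROOFS =====

def pvTab : List Char := ['0','1','2','3','4','5','6','7','8','9','a','b','c','d','e','f']

-- A's loop body over byte index i, for word list ws (lowercase table, hexcase = 0)
def pvGA (ws : List Int) (i : Int) : List Char :=
  let word := PySem.List.pyGetD ws (PySem.Int.floordiv i 4) 0
  [PySem.List.pyGetD pvTab (PySem.Int.mod (PySem.Int.floordiv word (2 ^ (PySem.Int.mod i 4 * 8 + 4).toNat)) 16) ' ',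
   PySem.List.pyGetD pvTab (PySem.Int.mod (PySem.Int.floordiv word (2 ^ (PySem.Int.mod i 4 * 8).toNat)) 16) ' ']

-- B's characters for one word
def pvGB (w : Int) : List Char :=
  (pvBytes w).flatMap (fun b => [Nat.digitChar (b / 16), Nat.digitChar (b % 16)])

lemma pvTab_digit (v : Nat) (hv : v < 16) : pvTab.getD v ' ' = Nat.digitChar v := by
  interval_cases v <;> decide

lemma pvTab_lookup (v : Int) (h0 : 0 ≤ v) (h1 : v < 16) :
    PySem.List.pyGetD pvTab v ' ' = Nat.digitChar v.toNat := by
  rw [PySem.List.pyGetD_eq_getElem pvTab ' ' h0 (by simp [pvTab]; omega)]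
  rw [show pvTab[v.toNat]'(by simp [pvTab]; omega) = pvTab.getD v.toNat ' ' from
        (List.getD_eq_getElem _ _ _).symm]
  exact pvTab_digit v.toNat (by omega)

lemma pvChop (a b c t : Int) (hb : b ≠ 0) : a % (b * c * t) / b % c = a / b % c := by
  have h1 : a % (b*c*t) = a + (-(a / (b*c*t)) * (c*t)) * b := by
    rw [Int.emod_def]; ring
  rw [h1, Int.add_mul_ediv_right _ _ hb,
    show a/b + -(a/(b*c*t))*(c*t) = a/b + -(a/(b*c*t))*t*c by ring,
    Int.add_mul_emod_self_right]

-- nibble arithmetic: Python's (w >> k) & 15 equals the nibble of w % 2^32, for k ≤ 28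
lemma pvNib (w : Int) (k : Nat) (hk : k ≤ 28) :
    PySem.Int.mod (PySem.Int.floordiv w (2 ^ k)) 16
      = (((PySem.Int.mod w 4294967296).toNat / 2 ^ k % 16 : Nat) : Int) := by
  have hp : (0:Int) < 2 ^ k := by positivity
  rw [PySem.Int.mod_eq_emod_of_pos (a := PySem.Int.floordiv w (2 ^ k)) (by norm_num),
      PySem.Int.mod_eq_emod_of_pos (a := w) (by norm_num),
      PySem.Int.floordiv_eq_ediv_of_pos hp]
  have hm0 : (0:Int) ≤ w % 4294967296 := Int.emod_nonneg w (by norm_num)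
  push_cast []
  rw [Int.toNat_of_nonneg hm0]
  have h32 : (4294967296:Int) = 2 ^ k * 16 * 2 ^ (28 - k) := by
    have he : k + 4 + (28 - k) = 32 := by omega
    rw [show (16:Int) = 2 ^ 4 from rfl, ← pow_add, ← pow_add, he]; norm_num
  rw [h32, pvChop w _ 16 _ (by positivity)]

-- the four trailing byte indices of `xs ++ [x]` produce exactly B's 8 characters for x
lemma pvLast (xs : List Int) (x : Int) (j : Int) (i : Int) (h0 : 0 ≤ j) (h3 : j < 4)
    (hi : i = (xs.length : Int) * 4 + j) :
    pvGA (xs ++ [x]) i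
      = [Nat.digitChar ((PySem.Int.mod x 4294967296).toNat / 2 ^ (j.toNat * 8 + 4) % 16),
         Nat.digitChar ((PySem.Int.mod x 4294967296).toNat / 2 ^ (j.toNat * 8) % 16)] := by
  have hfd : PySem.Int.floordiv ((xs.length : Int) * 4 + j) 4 = (xs.length : Int) := by
    rw [PySem.Int.floordiv_eq_ediv_of_pos (by norm_num)]; omega
  have hmd : PySem.Int.mod ((xs.length : Int) * 4 + j) 4 = j := by
    rw [PySem.Int.mod_eq_emod_of_pos (by norm_num)]; omega
  have hget : PySem.List.pyGetD (xs ++ [x]) ((xs.length : Int)) 0 = x := by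
    rw [PySem.List.pyGetD_natCast]; simp
  have hhi : (j * 8 + 4).toNat = j.toNat * 8 + 4 := by omega
  have hlo : (j * 8).toNat = j.toNat * 8 := by omega
  simp only [pvGA, hi]
  rw [hfd, hmd, hget, hhi, hlo, pvNib x _ (by omega), pvNib x _ (by omega),
      pvTab_lookup _ (by positivity) (by exact_mod_cast Int.ofNat_lt.mpr (Nat.mod_lt _ (by norm_num))),
      pvTab_lookup _ (by positivity) (by exact_mod_cast Int.ofNat_lt.mpr (Nat.mod_lt _ (by norm_num)))]
  simp only [Int.toNat_natCast]

-- main structural lemma: A's per-byte-index flatMap equals B's per-word flatMap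
lemma pvMain (ws : List Int) :
    (PySem.List.pyRange 0 ((ws.length : Int) * 4) 1).flatMap (pvGA ws) = ws.flatMap pvGB := by
  induction ws using List.reverseRecOn with
  | nil => simp [PySem.List.pyRange_one_eq_nil]
  | append_singleton xs x ih =>
    have hlen : ((xs ++ [x]).length : Int) * 4 = (xs.length : Int) * 4 + 1 + 1 + 1 + 1 := by
      simp; ring
    rw [hlen,
        PySem.List.pyRange_one_succ_right (by positivity),
        PySem.List.pyRange_one_succ_right (by positivity),
        PySem.List.pyRange_one_succ_right (by positivity),
        PySem.List.pyRange_one_succ_right (by positivity)]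
    rw [List.flatMap_append, List.flatMap_append, List.flatMap_append, List.flatMap_append]
    have hfront : (PySem.List.pyRange 0 ((xs.length : Int) * 4) 1).flatMap (pvGA (xs ++ [x]))
        = (PySem.List.pyRange 0 ((xs.length : Int) * 4) 1).flatMap (pvGA xs) := by
      apply List.flatMap_congr
      intro i hi
      rw [PySem.List.mem_pyRange_one] at hi
      have hfd : PySem.Int.floordiv i 4 = i / 4 := PySem.Int.floordiv_eq_ediv_of_pos (by norm_num)
      have h0 : 0 ≤ i / 4 := by omega
      have h1 : i / 4 < (xs.length : Int) := by omega
      simp only [pvGA]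
      rw [hfd,
          PySem.List.pyGetD_eq_getElem (xs ++ [x]) 0 h0 (by simp; omega),
          PySem.List.pyGetD_eq_getElem xs 0 h0 (by omega),
          List.getElem_append_left (by omega)]
    rw [hfront, ih, List.flatMap_append]
    simp only [List.flatMap_cons, List.flatMap_nil, List.append_nil, List.append_assoc]
    congr 1
    have e0 := pvLast xs x 0 ((xs.length : Int) * 4) (by norm_num) (by norm_num) (by ring)
    have e1 := pvLast xs x 1 ((xs.length : Int) * 4 + 1) (by norm_num) (by norm_num) (by ring)
    have e2 := pvLast xs x 2 ((xs.length : Int) * 4 + 1 + 1) (by norm_num) (by norm_num) (by ring)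
    have e3 := pvLast xs x 3 ((xs.length : Int) * 4 + 1 + 1 + 1) (by norm_num) (by norm_num) (by ring)
    rw [e0, e1, e2, e3]
    simp only [pvGB, pvBytes, List.flatMap_cons, List.flatMap_nil, List.append_nil,
      List.cons_append, List.nil_append]
    set m := (PySem.Int.mod x 4294967296).toNat with hm
    simp only [show Int.toNat 0 = 0 from rfl, show Int.toNat 1 = 1 from rfl,
      show Int.toNat 2 = 2 from rfl, show Int.toNat 3 = 3 from rfl, List.cons.injEq, and_true]
    norm_num
    all_goals and_intros <;> (congr 1) <;> omega

theorem binl2hex_spec : Claim_equal_binl2hex := by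
  intro ws _
  show binl2hex ws = binl2hex_alt ws
  unfold binl2hex binl2hex_alt
  simp only [pvHexcase, beq_self_eq_true, if_true]
  rw [PySem.List.foldl_append_eq_flatMap, PySem.List.foldl_append_eq_flatMap,
      List.nil_append, List.nil_append]
  congr 1
  rw [List.flatMap_assoc]
  exact pvMain ws
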